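-- pv_equiv track=rewrite | github.com/codewdy/mihomo-updater | babysitter/download_ui.py | _strip_zip_root
-- ===== SOURCE A (Python) =====
-- def _strip_zip_root(names: list[str]) -> str | None:
--     """若所有条目共享单一顶层目录，返回应剥离的前缀（含尾部 ``/``）。"""
--     file_names = [n for n in names if n and not n.endswith("/")]
--     if not file_names:
--         return None
--     roots = {n.split("/", 1)[0] for n in file_names}
--     if len(roots) != 1:
--         return None
--     root = roots.pop()
--     prefix = root + "/"
--     if not all(n.startswith(prefix) or n == root for n in file_names):
--         return None
--     return prefix
-- ===== SOURCE B (Python) =====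
-- def _strip_zip_root(names: list[str]) -> str | None:
--     """Single early-exit scan keeping one scalar candidate root (no set, one pass)."""
--     root = None
--     for n in names:
--         if not n or n.endswith("/"):
--             continue
--         top = n.split("/", 1)[0]
--         if root is None:
--             root = top
--         elif top != root:
--             return None
--     return None if root is None else root + "/"
-- ===== Notes on version B (the rewrite author's own statement) =====
-- stated objective: simpler
-- what changed: Replaced A's multi-pass pipeline (filter list, build a set of top components, size check, then a redundant all-prefix re-check) by one early-exit scan maintaining a single scalar candidate root.
import Mathlib
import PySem

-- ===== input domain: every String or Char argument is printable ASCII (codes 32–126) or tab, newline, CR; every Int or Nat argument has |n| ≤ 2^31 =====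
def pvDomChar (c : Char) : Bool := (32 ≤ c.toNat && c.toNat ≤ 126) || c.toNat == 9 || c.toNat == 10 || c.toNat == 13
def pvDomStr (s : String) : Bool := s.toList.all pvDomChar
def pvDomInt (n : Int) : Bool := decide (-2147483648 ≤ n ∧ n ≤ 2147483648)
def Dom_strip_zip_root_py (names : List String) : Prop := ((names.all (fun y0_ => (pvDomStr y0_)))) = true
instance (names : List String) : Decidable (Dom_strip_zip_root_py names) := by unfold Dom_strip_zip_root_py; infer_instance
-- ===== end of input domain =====

-- B replaces A's filter/set-build/size-check/all-check passes with one early-exit scan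
-- keeping a single scalar candidate root (objective: simpler).


-- ===== PORT A =====
-- n.split("/", 1)[0] : the characters before the first '/' (exact: sep is the single char '/')
def pyTop (n : String) : String := String.mk (n.toList.takeWhile (fun c => c != '/'))

def strip_zip_root_py (names : List String) : Option String :=
  let file_names := names.filter (fun n => !(n == "") && !(PySem.Str.endswith n "/"))
  if file_names.isEmpty then none
  else
    let roots := PySem.Set.ofList (file_names.map pyTop)
    if roots.length ≠ 1 then none
    else
      -- roots.pop() on the singleton set: its unique element
      let root := roots.headD ""
      let prefx := root ++ "/"
      if !(file_names.all (fun n => PySem.Str.startswith n prefx || n == root)) then none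
      else some prefx

-- ===== PORT B =====
def altGo : List String → Option String → Option String
  | [], root => root.map (fun r => r ++ "/")
  | n :: rest, root =>
    if n == "" || PySem.Str.endswith n "/" then altGo rest root
    else
      let top := pyTop n
      match root with
      | none => altGo rest (some top)
      | some r => if top != r then none else altGo rest (some r)

def strip_zip_root_py_alt (names : List String) : Option String := altGo names none

-- ===== PRECONDITION & SPEC =====
def Spec_strip_zip_root_py (names : List String) (out : Option String) : Prop := out = strip_zip_root_py_alt names
instance (names : List String) (out : Option String) : Decidable (Spec_strip_zip_root_py names out) := by unfold Spec_strip_zip_root_py; infer_instance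

-- ===== CLAIM (what is proved, stated in full; the proofs are below) =====
def Claim_equal_strip_zip_root_py : Prop := ∀ (names : List String), Dom_strip_zip_root_py names → Spec_strip_zip_root_py names (strip_zip_root_py names)

-- ===== LEMMAS AND PROOFS =====

def pvKeep (n : String) : Bool := !(n == "") && !(PySem.Str.endswith n "/")

-- reference function on the filtered list, both sides are reduced to it
def pvRef : List String → Option String
  | [] => none
  | f :: fs => if fs.all (fun m => pyTop m == pyTop f) then some (pyTop f ++ "/") else none

theorem toList_mk (l : List Char) : (String.mk l).toList = l :=
  Eq.symm (String.ofList_eq.mp rfl)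

theorem pvTop_check (n : String) : (PySem.Str.startswith n (pyTop n ++ "/") || n == pyTop n) = true := by
  have hsplit := List.takeWhile_append_dropWhile (p := fun c => c != '/') (l := n.toList)
  cases hdw : n.toList.dropWhile (fun c => c != '/') with
  | nil =>
    rw [hdw, List.append_nil] at hsplit
    have h : pyTop n = n := by
      unfold pyTop; rw [hsplit]
      exact String.toList_inj.mp (toList_mk _)
    simp [h]
  | cons c rest =>
    have hc : c = '/' := by
      have := List.head_dropWhile_not (p := fun c => c != '/') (l := n.toList) (by simp [hdw])
      simp [hdw] at this; exact this
    subst hc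
    have hpre : (pyTop n ++ "/").toList <+: n.toList := by
      refine ⟨rest, ?_⟩
      simp [pyTop, toList_mk]
      rw [← hdw]; exact hsplit
    simp only [Bool.or_eq_true]
    left
    simp only [PySem.Str.startswith_eq]
    exact (PySem.Chars.startswith_iff _ _).mpr hpre

theorem foldl_add_all_eq (ts : List String) (t : String) (h : ts.all (· == t)) :
    List.foldl PySem.Set.add [t] ts = [t] := by
  induction ts with
  | nil => rfl
  | cons a ts ih =>
    simp at h
    obtain ⟨ha, hts⟩ := h
    subst ha
    have h1 : PySem.Set.add [a] a = [a] := by simp [PySem.Set.add, PySem.Set.contains]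
    simp only [List.foldl_cons, h1]
    exact ih (by simpa using hts)

theorem ofList_all_eq (t : String) (ts : List String) (h : ts.all (· == t)) :
    PySem.Set.ofList (t :: ts) = [t] := by
  rw [PySem.Set.ofList_eq_foldl]
  have h0 : PySem.Set.add ([] : PySem.Set String) t = [t] := by
    simp [PySem.Set.add, PySem.Set.contains]
  simp only [List.foldl_cons, h0]
  exact foldl_add_all_eq ts t h

theorem ofList_len_one (t : String) (ts : List String) :
    (PySem.Set.ofList (t :: ts)).length = 1 ↔ ts.all (· == t) = true := by
  constructor
  · intro h
    obtain ⟨y, hy⟩ := List.length_eq_one_iff.mp h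
    have ht : t = y := by
      have hm : t ∈ PySem.Set.ofList (t :: ts) := (PySem.Set.mem_ofList _ _).mpr (by simp)
      rw [hy] at hm; simpa using hm
    simp only [List.all_eq_true]
    intro a ha
    have hm : a ∈ PySem.Set.ofList (t :: ts) := (PySem.Set.mem_ofList _ _).mpr (by simp [ha])
    rw [hy] at hm
    simp at hm
    simp [hm, ← ht]
  · intro h
    rw [ofList_all_eq t ts h]
    rfl

theorem pvKeep_false (n : String) (hs : (n == "" || PySem.Str.endswith n "/") = true) :
    pvKeep n = false := by
  unfold pvKeep
  rcases (Bool.or_eq_true _ _).mp hs with h | h <;> rw [h] <;> simp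

theorem pvKeep_true (n : String) (hs : ¬ (n == "" || PySem.Str.endswith n "/") = true) :
    pvKeep n = true := by
  have hs' : (n == "" || PySem.Str.endswith n "/") = false := eq_false_of_ne_true hs
  rcases Bool.or_eq_false_iff.mp hs' with ⟨h1, h2⟩
  unfold pvKeep
  rw [h1, h2]
  rfl

theorem altGo_some (names : List String) (r : String) :
    altGo names (some r) =
      if (names.filter pvKeep).all (fun m => pyTop m == r) then some (r ++ "/") else none := by
  induction names generalizing r with
  | nil => simp [altGo]
  | cons n rest ih =>
    by_cases hs : (n == "" || PySem.Str.endswith n "/") = true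
    · have hf : List.filter pvKeep (n :: rest) = List.filter pvKeep rest := by
        simp [List.filter_cons, pvKeep_false n hs]
      unfold altGo
      rw [if_pos hs, hf]
      exact ih r
    · have hk := pvKeep_true n hs
      unfold altGo
      rw [if_neg hs]
      by_cases ht : (pyTop n == r) = true
      · have hne : (pyTop n != r) = false := by rw [bne, ht]; rfl
        show (if (pyTop n != r) = true then none else altGo rest (some r)) = _
        rw [hne]
        simp only [Bool.false_eq_true, if_false]
        rw [ih r]
        have hcond : (List.filter pvKeep (n :: rest)).all (fun m => pyTop m == r)
            = (List.filter pvKeep rest).all (fun m => pyTop m == r) := by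
          simp [List.filter_cons, hk, ht]
        rw [hcond]
      · have ht' : (pyTop n == r) = false := eq_false_of_ne_true ht
        have hne : (pyTop n != r) = true := by rw [bne, ht']; rfl
        show (if (pyTop n != r) = true then none else altGo rest (some r)) = _
        rw [hne]
        have hcond : (List.filter pvKeep (n :: rest)).all (fun m => pyTop m == r) = false := by
          simp [List.filter_cons, hk, ht']
        rw [hcond]
        rfl

theorem alt_eq_ref (names : List String) : strip_zip_root_py_alt names = pvRef (names.filter pvKeep) := by
  unfold strip_zip_root_py_alt
  induction names with
  | nil => rfl
  | cons n rest ih =>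
    by_cases hs : (n == "" || PySem.Str.endswith n "/") = true
    · have hf : List.filter pvKeep (n :: rest) = List.filter pvKeep rest := by
        simp [List.filter_cons, pvKeep_false n hs]
      unfold altGo
      rw [if_pos hs, hf]
      exact ih
    · have hk := pvKeep_true n hs
      have hf : List.filter pvKeep (n :: rest) = n :: List.filter pvKeep rest := by
        simp [List.filter_cons, hk]
      unfold altGo
      rw [if_neg hs, hf]
      show altGo rest (some (pyTop n)) = _
      rw [altGo_some]
      rfl

theorem a_eq_ref (names : List String) : strip_zip_root_py names = pvRef (names.filter pvKeep) := by
  unfold strip_zip_root_py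
  have hfilter : names.filter (fun n => !(n == "") && !(PySem.Str.endswith n "/"))
      = names.filter pvKeep := rfl
  rw [hfilter]
  cases hfs : names.filter pvKeep with
  | nil => rfl
  | cons f fs =>
    simp only [List.isEmpty_cons, Bool.false_eq_true, if_false, List.map_cons]
    by_cases hall : fs.all (fun m => pyTop m == pyTop f) = true
    · have hset : PySem.Set.ofList (pyTop f :: fs.map pyTop) = [pyTop f] :=
        ofList_all_eq _ _ (by simpa using hall)
      rw [hset]
      rw [if_neg (by simp)]
      simp only [List.headD_cons]
      have hchk : ((f :: fs).all
          (fun n => PySem.Str.startswith n (pyTop f ++ "/") || n == pyTop f)) = true := by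
        simp only [List.all_eq_true]
        intro a ha
        have heq : pyTop a = pyTop f := by
          rcases List.mem_cons.mp ha with ha | ha
          · rw [ha]
          · have := (List.all_eq_true.mp hall) a ha
            simpa using this
        rw [← heq]
        exact pvTop_check a
      rw [hchk]
      simp only [Bool.not_true, Bool.false_eq_true, if_false]
      exact (if_pos hall).symm
    · have hlen : (PySem.Set.ofList (pyTop f :: fs.map pyTop)).length ≠ 1 := by
        intro h
        exact hall (by simpa using (ofList_len_one _ _).mp h)
      rw [if_pos hlen]
      exact (if_neg hall).symm

-- ===== VERDICT (by name: the statement is the Claim_ definition above) =====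
theorem strip_zip_root_py_spec : Claim_equal_strip_zip_root_py := by
  intro names _
  unfold Spec_strip_zip_root_py
  rw [a_eq_ref, alt_eq_ref]
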